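-- pv_equiv track=rewrite | github.com/horkypetr94/advent_of_code_2025 | day_3.py | calculate_total_joltage
-- ===== SOURCE A (Python) =====
-- def find_highest_number_from_line(line: str, offset:int) -> tuple[int, int]:
--     highest_number = 0
--     highest_number_index = 0
--
--     for index, char in enumerate(line):
--         if int(char) > highest_number:
--             highest_number = int(char)
--             highest_number_index = index
--
--     return highest_number, highest_number_index + offset + 1
--
-- def calculate_total_joltage(input_lines: list[str], num_cycles = int) -> int:
--     joltage_counter = 0
--     for input_line in input_lines:
--         joltage_number_string = ""
--         highest_index = -1
--
--         for num_cycle in range(num_cycles-1, -1, -1 ):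
--             if num_cycle > 0:
--                 sub_line = input_line[highest_index + 1:-num_cycle]
--             else:
--                 sub_line = input_line[highest_index + 1:]
--             highest, highest_index = find_highest_number_from_line(sub_line, highest_index)
--             joltage_number_string += str(highest)
--
--         joltage_counter += int(joltage_number_string)
--
--     return joltage_counter
-- ===== SOURCE B (Python) =====
-- def calculate_total_joltage(input_lines: list[str], num_cycles=int) -> int:
--     total = 0
--     for line in input_lines:
--         n = len(line)
--         if n < num_cycles:
--             continue  # fewer digits than cycles: no full selection, contributes 0
--         stack = []
--         for i, ch in enumerate(line):
--             while stack and stack[-1] < ch and len(stack) + (n - i) > num_cycles: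
--                 stack.pop()
--             if len(stack) < num_cycles:
--                 stack.append(ch)
--         total += int(''.join(stack))
--     return total
-- ===== Notes on version B (the rewrite author's own statement) =====
-- stated objective: faster
-- what changed: A re-scans a shrinking window to pick the next-highest digit num_cycles times per line; B makes a single left-to-right pass per line with a monotonic stack that keeps the lexicographically largest num_cycles-digit subsequence.
import Mathlib
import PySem

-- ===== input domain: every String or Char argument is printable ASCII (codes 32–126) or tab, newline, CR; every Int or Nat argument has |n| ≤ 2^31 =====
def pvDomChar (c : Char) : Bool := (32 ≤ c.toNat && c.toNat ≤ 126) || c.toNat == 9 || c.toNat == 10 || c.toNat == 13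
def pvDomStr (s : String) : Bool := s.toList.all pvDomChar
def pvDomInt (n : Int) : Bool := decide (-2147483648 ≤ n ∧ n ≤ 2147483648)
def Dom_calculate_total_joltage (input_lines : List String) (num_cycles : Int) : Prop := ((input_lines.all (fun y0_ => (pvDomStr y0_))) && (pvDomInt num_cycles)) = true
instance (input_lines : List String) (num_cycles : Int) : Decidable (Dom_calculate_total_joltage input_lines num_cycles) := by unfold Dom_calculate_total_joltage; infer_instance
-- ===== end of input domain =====

-- B replaces A's O(len·num_cycles) repeated window-argmax selection by the one-pass
-- monotonic-stack selection of the largest num_cycles-digit subsequence per line.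

-- ===== PORT A =====
-- find_highest_number_from_line: scan with enumerate, keeping strict improvements
def pvFindHighest (line : String) (offset : Int) : Int × Int :=
  let r := (PySem.List.enumerate line.toList 0).foldl
    (fun (st : Int × Int) ic =>
      let v := (PySem.Int.ofStr? (String.ofList [ic.2])).getD 0   -- int(char); Pre_ keeps it a digit
      if st.1 < v then (v, ic.1) else st) (0, 0)
  (r.1, r.2 + offset + 1)

def calculate_total_joltage (input_lines : List String) (num_cycles : Int) : Int :=
  input_lines.foldl
    (fun joltage_counter input_line =>
      let st := (PySem.List.pyRange (num_cycles - 1) (-1) (-1)).foldl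
        (fun (st : String × Int) num_cycle =>
          let sub_line := if num_cycle > 0
            then PySem.Str.slice input_line (some (st.2 + 1)) (some (-num_cycle))
            else PySem.Str.slice input_line (some (st.2 + 1)) none
          let h := pvFindHighest sub_line st.2
          (st.1 ++ PySem.Int.toStr h.1, h.2))
        ("", -1)
      joltage_counter + (PySem.Int.ofStr? st.1).getD 0)   -- int(joltage_number_string); Pre_ excludes num_cycles ≤ 0
    0

-- ===== PORT B =====
-- the Python while-pop loop (stack kept reversed: head = Python's stack[-1])
def pvPops (stack : List Char) (ch : Char) (rem : Nat) (k : Int) : List Char :=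
  match stack with
  | [] => []
  | top :: rest =>
    if top < ch ∧ ((stack.length : Int) + rem > k) then pvPops rest ch rem k else stack

-- the for-loop over the line's characters; rem passed to pvPops is n - i
def pvStackRun (k : Int) (stack : List Char) (t : List Char) : List Char :=
  match t with
  | [] => stack
  | c :: t' =>
    let s' := pvPops stack c (t'.length + 1) k
    pvStackRun k (if (s'.length : Int) < k then c :: s' else s') t'

def calculate_total_joltage_alt (input_lines : List String) (num_cycles : Int) : Int :=
  input_lines.foldl
    (fun total line =>
      let cs := line.toList
      if (cs.length : Int) < num_cycles then total
      else total + (PySem.Int.ofStr? (String.ofList ((pvStackRun num_cycles [] cs).reverse))).getD 0)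
    0

-- ===== PRECONDITION & SPEC =====
-- Pre_ is exactly where A returns normally: num_cycles ≥ 1 (else int("") raises ValueError —
-- unless there are no lines at all, in which case the loop body never runs) and every line at
-- least num_cycles long is all digits (A calls int(char) on every char of such lines;
-- shorter lines are never inspected, so they may contain anything).
def Pre_calculate_total_joltage (input_lines : List String) (num_cycles : Int) : Prop :=
  (input_lines = [] ∨ 1 ≤ num_cycles) ∧
  ∀ s ∈ input_lines, num_cycles ≤ PySem.Str.len s → PySem.Str.strIsdigit s = true
instance (input_lines : List String) (num_cycles : Int) : Decidable (Pre_calculate_total_joltage input_lines num_cycles) := by unfold Pre_calculate_total_joltage; infer_instance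

def pvWitness_calculate_total_joltage : List String × Int := (["35192", "x!"], 3)

def Spec_calculate_total_joltage (input_lines : List String) (num_cycles : Int) (out : Int) : Prop := out = calculate_total_joltage_alt input_lines num_cycles
instance (input_lines : List String) (num_cycles : Int) (out : Int) : Decidable (Spec_calculate_total_joltage input_lines num_cycles out) := by unfold Spec_calculate_total_joltage; infer_instance

-- ===== CLAIM (what is proved, stated in full; the proofs are below) =====
def Claim_equal_calculate_total_joltage : Prop := ∀ (input_lines : List String) (num_cycles : Int), Dom_calculate_total_joltage input_lines num_cycles → Pre_calculate_total_joltage input_lines num_cycles → Spec_calculate_total_joltage input_lines num_cycles (calculate_total_joltage input_lines num_cycles)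

-- ===== LEMMAS AND PROOFS =====

-- the integer value of a digit character
def pvVal (c : Char) : Int := (c.toNat : Int) - 48

-- first maximum of a nonempty list: (prefix before it, the maximum, suffix after it)
def pvPick : List Char → List Char × Char × List Char
  | [] => ([], 'x', [])
  | [a] => ([], a, [])
  | a :: b :: rest =>
    let (u, c, v) := pvPick (b :: rest)
    if a < c then (a :: u, c, v) else ([], a, b :: rest)

-- reference greedy: repeatedly take the first maximum of the feasible window
def pvGreedy : List Char → Nat → List Char
  | _, 0 => []
  | l, (k+1) =>
    let p := pvPick (l.take (l.length - k))
    p.2.1 :: pvGreedy (p.2.2 ++ l.drop (l.length - k)) k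

theorem pv_dw_rep (m : Nat) :
    List.dropWhile PySem.Int.isIntSpace (List.replicate m '0') = List.replicate m '0' := by
  cases m <;> simp [List.replicate_succ, PySem.Int.isIntSpace]

-- int("0" * (n+1)) = 0
theorem pv_zeros_parse : ∀ (n : Nat), PySem.Int.ofChars? ('0' :: List.replicate n '0') = some 0 := by
  intro n
  induction n with
  | zero => decide
  | succ m ih =>
    simp only [PySem.Int.ofChars?] at ih ⊢
    rw [show ('0' :: List.replicate m '0') = List.replicate (m+1) '0' from List.replicate_succ.symm,
        pv_dw_rep, List.reverse_replicate, pv_dw_rep, List.reverse_replicate] at ih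
    rw [show ('0' :: List.replicate (m+1) '0') = List.replicate (m+2) '0' from List.replicate_succ.symm,
        pv_dw_rep, List.reverse_replicate, pv_dw_rep, List.reverse_replicate]
    rw [List.replicate_succ] at ih
    rw [List.replicate_succ, List.replicate_succ]
    exact ih

theorem pv_pops_mem : ∀ (s : List Char) (ch : Char) (rem : Nat) (k : Int) (x : Char),
    x ∈ pvPops s ch rem k → x ∈ s := by
  intro s ch rem k
  induction s with
  | nil => simp [pvPops]
  | cons a s ih =>
    intro x
    simp only [pvPops]
    split
    · intro h; exact List.mem_cons_of_mem _ (ih x h)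
    · exact fun h => h

theorem pv_pops_all : ∀ (s : List Char) (ch : Char) (rem : Nat) (k : Int),
    (∀ x ∈ s, x < ch) → k ≤ (rem : Int) → pvPops s ch rem k = [] := by
  intro s ch rem k
  induction s with
  | nil => simp [pvPops]
  | cons a s ih =>
    intro h hk
    simp only [pvPops]
    rw [if_pos]
    · exact ih (fun x hx => h x (List.mem_cons_of_mem _ hx)) hk
    · constructor
      · exact h a (List.mem_cons_self)
      · have : (0:Int) < ((a :: s).length : Int) := by simp
        omega

theorem pv_pops_bottom : ∀ (rs : List Char) (c ch : Char) (rem : Nat) (k : Int),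
    (¬ c < ch ∨ (rem : Int) + 1 ≤ k) →
    pvPops (rs ++ [c]) ch rem k = pvPops rs ch rem (k - 1) ++ [c] := by
  intro rs c ch rem k
  induction rs with
  | nil =>
    intro h
    have hcond : ¬ (c < ch ∧ ((([c] : List Char).length : Int) + rem > k)) := by
      rcases h with h | h
      · exact fun hx => h hx.1
      · intro hx; simp only [List.length_cons, List.length_nil] at hx; omega
    simp only [List.nil_append, pvPops]
    rw [if_neg hcond]
  | cons a rs ih =>
    intro h
    have hlen : ((a :: rs ++ [c]).length : Int) = ((a :: rs).length : Int) + 1 := by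
      simp
    by_cases hc : a < ch ∧ (((a :: rs).length : Int) + 1 + rem > k)
    · have h1 : a < ch ∧ (((a :: rs ++ [c]).length : Int) + rem > k) := by
        refine ⟨hc.1, ?_⟩; rw [hlen]; omega
      have h2 : a < ch ∧ (((a :: rs).length : Int) + rem > k - 1) := by
        refine ⟨hc.1, ?_⟩; omega
      simp only [List.cons_append, pvPops]
      rw [if_pos, if_pos]
      · exact ih h
      · exact h2
      · exact h1
    · have h1 : ¬ (a < ch ∧ (((a :: rs ++ [c]).length : Int) + rem > k)) := by
        intro hx; exact hc ⟨hx.1, by rw [hlen] at hx; omega⟩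
      have h2 : ¬ (a < ch ∧ (((a :: rs).length : Int) + rem > k - 1)) := by
        intro hx; exact hc ⟨hx.1, by omega⟩
      simp only [List.cons_append, pvPops]
      rw [if_neg, if_neg]
      · simp
      · exact h2
      · exact h1

theorem pv_run_zero : ∀ (l : List Char), pvStackRun 0 [] l = [] := by
  intro l
  induction l with
  | nil => simp [pvStackRun]
  | cons c t ih => simpa [pvStackRun, pvPops] using ih

theorem pv_run_prefix : ∀ (w : List Char) (c : Char) (t rs : List Char) (k : Int),
    1 ≤ k → k ≤ (t.length : Int) + 1 →
    (∀ x ∈ rs, x < c) → (∀ x ∈ w, x < c) →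
    pvStackRun k rs (w ++ c :: t) = pvStackRun k [c] t := by
  intro w c
  induction w with
  | nil =>
    intro t rs k hk1 hkt hrs _
    simp only [List.nil_append, pvStackRun]
    rw [pv_pops_all rs c (t.length + 1) k hrs (by push_cast; omega)]
    rw [if_pos (by simpa using hk1)]
  | cons a w ih =>
    intro t rs k hk1 hkt hrs hw
    simp only [List.cons_append, pvStackRun]
    apply ih
    · exact hk1
    · exact hkt
    · intro x hx
      have ha : a < c := hw a List.mem_cons_self
      split at hx
      · rcases List.mem_cons.mp hx with h | h
        · exact h ▸ ha
        · exact hrs x (pv_pops_mem _ _ _ _ _ h)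
      · exact hrs x (pv_pops_mem _ _ _ _ _ hx)
    · exact fun x hx => hw x (List.mem_cons_of_mem _ hx)

theorem pv_run_bottom : ∀ (t : List Char) (c : Char) (rs : List Char) (k : Int),
    (∀ (u : List Char) (ch : Char) (v : List Char), t = u ++ ch :: v → (¬ c < ch ∨ (v.length : Int) + 2 ≤ k)) →
    pvStackRun k (rs ++ [c]) t = pvStackRun (k - 1) rs t ++ [c] := by
  intro t c
  induction t with
  | nil => intro rs k _; simp [pvStackRun]
  | cons ch t ih =>
    intro rs k H
    simp only [pvStackRun]
    rw [pv_pops_bottom rs c ch (t.length + 1) k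
      (by simpa using H [] ch t rfl)]
    have hlen : (((pvPops rs ch (t.length + 1) (k - 1) ++ [c]).length : Int) < k) ↔
        (((pvPops rs ch (t.length + 1) (k - 1)).length : Int) < k - 1) := by
      simp; omega
    by_cases hp : ((pvPops rs ch (t.length + 1) (k - 1)).length : Int) < k - 1
    · rw [if_pos (hlen.mpr hp), if_pos hp]
      have := ih (ch :: pvPops rs ch (t.length + 1) (k - 1)) k
        (fun u x v hx => H (ch :: u) x v (by simp [hx]))
      simpa using this
    · rw [if_neg (fun hx => hp (hlen.mp hx)), if_neg hp]
      exact ih _ k (fun u x v hx => H (ch :: u) x v (by simp [hx]))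

theorem pv_pick_spec : ∀ (w : List Char), w ≠ [] →
    w = (pvPick w).1 ++ (pvPick w).2.1 :: (pvPick w).2.2 ∧
    (∀ x ∈ (pvPick w).1, x < (pvPick w).2.1) ∧
    (∀ x ∈ (pvPick w).2.2, x ≤ (pvPick w).2.1) := by
  intro w
  induction w with
  | nil => intro h; exact absurd rfl h
  | cons a w ih =>
    intro _
    cases w with
    | nil => simp [pvPick]
    | cons b rest =>
      obtain ⟨heq, hu, hv⟩ := ih (by simp)
      simp only [pvPick]
      by_cases hc : a < (pvPick (b :: rest)).2.1
      · rw [if_pos hc]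
        refine ⟨by simpa using heq, ?_, hv⟩
        intro x hx
        rcases List.mem_cons.mp hx with h | h
        · exact h ▸ hc
        · exact hu x h
      · rw [if_neg hc]
        refine ⟨by simp, by simp, ?_⟩
        intro x hx
        rw [heq] at hx
        rcases List.mem_append.mp hx with h | h
        · exact le_of_lt (lt_of_lt_of_le (hu x h) (not_lt.mp hc))
        · rcases List.mem_cons.mp h with h | h
          · exact h ▸ not_lt.mp hc
          · exact le_trans (hv x h) (not_lt.mp hc)

theorem pv_stack_eq_greedy : ∀ (k : Nat) (l : List Char), k ≤ l.length →
    (pvStackRun (k : Int) [] l).reverse = pvGreedy l k := by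
  intro k
  induction k with
  | zero => intro l _; simp [pv_run_zero, pvGreedy]
  | succ k ih =>
    intro l hl
    have hwne : l.take (l.length - k) ≠ [] := by
      intro h; have := congrArg List.length h; simp at this; omega
    obtain ⟨heq, hu, hv⟩ := pv_pick_spec _ hwne
    generalize hp : pvPick (l.take (l.length - k)) = p at heq hu hv
    obtain ⟨u, c, v⟩ := p
    simp only at heq hu hv
    have hg : pvGreedy l (k+1) = c :: pvGreedy (v ++ l.drop (l.length - k)) k := by
      rw [pvGreedy, hp]
    have hdlen : (l.drop (l.length - k)).length = k := by simp; omega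
    have hulen : u.length + 1 + v.length = l.length - k := by
      have := congrArg List.length heq; simp at this; omega
    have htlen : (v ++ l.drop (l.length - k)).length = v.length + k := by
      simp [hdlen]
    have hld : l = u ++ c :: (v ++ l.drop (l.length - k)) := by
      conv_lhs => rw [← List.take_append_drop (l.length - k) l]
      rw [heq]; simp
    have hH : ∀ (u' : List Char) (ch : Char) (v' : List Char),
        (v ++ l.drop (l.length - k)) = u' ++ ch :: v' →
        (¬ c < ch ∨ ((v'.length : Int) + 2 ≤ ((k+1 : Nat) : Int))) := by
      intro u' ch v' hsplit
      by_cases hch : c < ch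
      · have hlen' : u'.length + 1 + v'.length = v.length + k := by
          have := congrArg List.length hsplit; simp at this; omega
        by_cases hvlen : v'.length < k
        · right; push_cast; omega
        · exfalso
          have hu'lt : u'.length < v.length := by omega
          have e1 : (v ++ l.drop (l.length - k))[u'.length]? = some ch := by
            rw [hsplit, List.getElem?_append_right (le_refl _)]
            simp
          have e2 : (v ++ l.drop (l.length - k))[u'.length]? = v[u'.length]? := by
            rw [List.getElem?_append_left hu'lt]
          have : ch ∈ v := by
            rw [e2] at e1
            exact List.mem_of_getElem? e1
          exact absurd hch (not_lt.mpr (hv ch this))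
      · left; exact hch
    have hmain : pvStackRun ((k+1 : Nat) : Int) [] l
        = pvStackRun (k : Int) [] (v ++ l.drop (l.length - k)) ++ [c] := by
      conv_lhs => rw [hld]
      rw [pv_run_prefix u c (v ++ l.drop (l.length - k)) [] ((k+1 : Nat) : Int)
        (by push_cast; omega) (by rw [htlen]; push_cast; omega) (by simp) hu]
      rw [show ([c] : List Char) = [] ++ [c] from rfl,
          pv_run_bottom _ c [] ((k+1 : Nat) : Int) hH]
      congr 1
      congr 1
      push_cast; omega
    rw [hmain, hg]
    simp only [List.reverse_append, List.reverse_cons, List.reverse_nil, List.nil_append,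
      List.singleton_append]
    rw [ih _ (by omega)]

theorem pv_char_le (a b : Char) : a ≤ b ↔ a.toNat ≤ b.toNat := by
  rw [Char.le_def]; exact (UInt32.le_iff_toNat_le ..)

theorem pv_char_lt (a b : Char) : a < b ↔ a.toNat < b.toNat := by
  rw [Char.lt_def]; exact (UInt32.lt_iff_toNat_lt ..)

theorem pv_digit_lt (a b : Char) : a < b ↔ pvVal a < pvVal b := by
  rw [pv_char_lt]; simp [pvVal]

theorem pv_digit_le (a b : Char) : a ≤ b ↔ pvVal a ≤ pvVal b := by
  rw [pv_char_le]; simp [pvVal]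

theorem pv_digit_bounds (c : Char) (h : PySem.Chars.isdigit c = true) :
    48 ≤ c.toNat ∧ c.toNat ≤ 57 := by
  simp only [PySem.Chars.isdigit, Bool.and_eq_true, decide_eq_true_eq] at h
  obtain ⟨h1, h2⟩ := h
  rw [pv_char_le] at h1 h2
  exact ⟨h1, h2⟩

theorem pv_digit_cases (c : Char) (h : PySem.Chars.isdigit c = true) :
    c = '0' ∨ c = '1' ∨ c = '2' ∨ c = '3' ∨ c = '4' ∨ c = '5' ∨ c = '6' ∨ c = '7' ∨ c = '8' ∨ c = '9' := by
  obtain ⟨h1, h2⟩ := pv_digit_bounds c h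
  have hval : c.val.toNat = c.toNat := rfl
  interval_cases hc : c.toNat <;>
    simp [Char.ext_iff, UInt32.ext_iff, hval]

theorem pv_digit_int (c : Char) (h : PySem.Chars.isdigit c = true) :
    (PySem.Int.ofStr? (String.ofList [c])).getD 0 = pvVal c := by
  rcases pv_digit_cases c h with h | h | h | h | h | h | h | h | h | h <;> subst h <;> decide

theorem pv_digit_toStr (c : Char) (h : PySem.Chars.isdigit c = true) :
    (PySem.Int.toStr (pvVal c)).toList = [c] := by
  rcases pv_digit_cases c h with h | h | h | h | h | h | h | h | h | h <;> subst h <;> decide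

theorem pv_digit_nonneg (c : Char) (h : PySem.Chars.isdigit c = true) : 0 ≤ pvVal c := by
  have := (pv_digit_bounds c h).1; simp [pvVal]; omega

theorem pv_fh_skip : ∀ (w : List Char) (i : Int) (st : Int × Int),
    (∀ x ∈ w, PySem.Chars.isdigit x = true ∧ pvVal x ≤ st.1) →
    (PySem.List.enumerate w i).foldl
      (fun (st : Int × Int) ic =>
        let v := (PySem.Int.ofStr? (String.ofList [ic.2])).getD 0
        if st.1 < v then (v, ic.1) else st) st = st := by
  intro w
  induction w with
  | nil => intro i st _; simp [PySem.List.enumerate_nil]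
  | cons a w ih =>
    intro i st h
    rw [PySem.List.enumerate_cons, List.foldl_cons]
    obtain ⟨hd, hle⟩ := h a List.mem_cons_self
    simp only [pv_digit_int a hd]
    rw [if_neg (by omega)]
    exact ih (i+1) st (fun x hx => h x (List.mem_cons_of_mem _ hx))

theorem pv_fh_max : ∀ (w : List Char) (i : Int) (st : Int × Int),
    (∀ x ∈ w, PySem.Chars.isdigit x = true) → w ≠ [] → st.1 < pvVal (pvPick w).2.1 → 0 ≤ st.1 →
    (PySem.List.enumerate w i).foldl
      (fun (st : Int × Int) ic =>
        let v := (PySem.Int.ofStr? (String.ofList [ic.2])).getD 0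
        if st.1 < v then (v, ic.1) else st) st = (pvVal (pvPick w).2.1, i + (pvPick w).1.length) := by
  intro w
  induction w with
  | nil => intro i st _ hne; exact absurd rfl hne
  | cons a w ih =>
    intro i st hdig _ hlt hge
    have hda : PySem.Chars.isdigit a = true := hdig a List.mem_cons_self
    rw [PySem.List.enumerate_cons, List.foldl_cons]
    simp only [pv_digit_int a hda]
    cases w with
    | nil =>
      simp only [pvPick] at hlt ⊢
      rw [if_pos hlt]
      simp [PySem.List.enumerate_nil]
    | cons b rest =>
      have hwne : (b :: rest) ≠ [] := by simp
      obtain ⟨heq, hu, hv⟩ := pv_pick_spec (b :: rest) hwne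
      simp only [pvPick] at hlt ⊢
      by_cases hc : a < (pvPick (b :: rest)).2.1
      · rw [if_pos hc] at hlt ⊢
        simp only at hlt ⊢
        by_cases hup : st.1 < pvVal a
        · rw [if_pos hup]
          rw [ih (i+1) (pvVal a, i) (fun x hx => hdig x (List.mem_cons_of_mem _ hx)) hwne
            (by simpa using (pv_digit_lt a _).mp hc) (pv_digit_nonneg a hda)]
          simp only [List.length_cons, Prod.mk.injEq]
          refine ⟨trivial, by push_cast; omega⟩
        · rw [if_neg hup]
          rw [ih (i+1) st (fun x hx => hdig x (List.mem_cons_of_mem _ hx)) hwne hlt hge]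
          simp only [List.length_cons, Prod.mk.injEq]
          refine ⟨trivial, by push_cast; omega⟩
      · rw [if_neg hc] at hlt ⊢
        simp only at hlt ⊢
        rw [if_pos hlt]
        have hall : ∀ x ∈ (b :: rest), PySem.Chars.isdigit x = true ∧ pvVal x ≤ pvVal a := by
          intro x hx
          refine ⟨hdig x (List.mem_cons_of_mem _ hx), ?_⟩
          rw [heq] at hx
          have hxa : x ≤ a := by
            rcases List.mem_append.mp hx with h | h
            · exact le_of_lt (lt_of_lt_of_le (hu x h) (not_lt.mp hc))
            · rcases List.mem_cons.mp h with h | h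
              · exact h ▸ not_lt.mp hc
              · exact le_trans (hv x h) (not_lt.mp hc)
          exact (pv_digit_le x a).mp hxa
        rw [pv_fh_skip (b :: rest) (i+1) (pvVal a, i) hall]
        simp

theorem pv_fh_empty : ∀ (s : String) (offset : Int), s.toList = [] →
    pvFindHighest s offset = (0, offset + 1) := by
  intro s offset h
  simp [pvFindHighest, h, PySem.List.enumerate_nil]

theorem pv_fh_spec : ∀ (s : String) (offset : Int),
    (∀ x ∈ s.toList, PySem.Chars.isdigit x = true) → s.toList ≠ [] →
    pvFindHighest s offset = (pvVal (pvPick s.toList).2.1, offset + 1 + (pvPick s.toList).1.length) := by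
  intro s offset hdig hne
  obtain ⟨heq, hu, hv⟩ := pv_pick_spec s.toList hne
  generalize hp : pvPick s.toList = p at heq hu hv ⊢
  obtain ⟨u, c, v⟩ := p
  simp only at heq hu hv ⊢
  have hdc : PySem.Chars.isdigit c = true := by
    apply hdig; rw [heq]; simp
  by_cases h0 : (0 : Int) < pvVal c
  · have := pv_fh_max s.toList 0 (0, 0) hdig hne (by rw [hp]; exact h0) le_rfl
    rw [hp] at this
    simp only at this
    simp only [pvFindHighest, this]
    simp only [Prod.mk.injEq]
    refine ⟨trivial, by omega⟩
  · -- the maximum is '0': the fold never updates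
    have hval0 : pvVal c = 0 := le_antisymm (not_lt.mp h0) (pv_digit_nonneg _ hdc)
    have hall : ∀ x ∈ s.toList, PySem.Chars.isdigit x = true ∧ pvVal x ≤ (0:Int) := by
      intro x hx
      refine ⟨hdig x hx, ?_⟩
      have hxc : x ≤ c := by
        rw [heq] at hx
        rcases List.mem_append.mp hx with h | h
        · exact le_of_lt (hu x h)
        · rcases List.mem_cons.mp h with h | h
          · exact le_of_eq h
          · exact hv x h
      have := (pv_digit_le x c).mp hxc
      omega
    have hu0 : u = [] := by
      rcases hl : u with _ | ⟨a, u'⟩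
      · rfl
      · exfalso
        have ha : a ∈ u := by rw [hl]; simp
        have h1 := hu a ha
        have h2 := (pv_digit_lt a c).mp h1
        have ham : a ∈ s.toList := by rw [heq]; exact List.mem_append_left _ ha
        have h4 := pv_digit_nonneg a (hdig a ham)
        omega
    rw [pvFindHighest]
    rw [pv_fh_skip s.toList 0 (0,0) hall]
    simp [hval0, hu0]

theorem pv_slice_mixed {α : Type} (xs : List α) (j k : Nat) (hk : 0 < k) :
    PySem.List.slice xs (some (j : Int)) (some (-(k : Int))) = (xs.drop j).take (xs.length - k - j) := by
  simp only [PySem.List.slice, PySem.List.clampIdx_natCast, PySem.List.clampIdx_neg_natCast _ _ hk]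
  by_cases h : j ≤ xs.length
  · rw [min_eq_left h]
  · rw [min_eq_right (by omega)]
    rw [List.drop_length, List.drop_eq_nil_iff.mpr (by omega)]
    simp

theorem pv_A_loop : ∀ (k : Nat) (line : String) (j : Nat) (s : String) (hi : Int),
    hi = (j : Int) - 1 →
    (∀ c ∈ line.toList, PySem.Chars.isdigit c = true) →
    j + k ≤ line.toList.length →
    (((PySem.List.pyRange ((k : Int) - 1) (-1) (-1)).foldl
      (fun (st : String × Int) num_cycle =>
        let sub_line := if num_cycle > 0
          then PySem.Str.slice line (some (st.2 + 1)) (some (-num_cycle))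
          else PySem.Str.slice line (some (st.2 + 1)) none
        let h := pvFindHighest sub_line st.2
        (st.1 ++ PySem.Int.toStr h.1, h.2))
      (s, hi)).1).toList = s.toList ++ pvGreedy (line.toList.drop j) k := by
  intro k
  induction k with
  | zero =>
    intro line j s hi hhi hdig hlen
    rw [show ((0 : Nat) : Int) - 1 = -1 by norm_num, PySem.List.pyRange_neg_one_eq_nil le_rfl]
    simp [pvGreedy]
  | succ k ih =>
    intro line j s hi hhi hdig hlen
    rw [show (((k+1 : Nat)) : Int) - 1 = (k : Int) by push_cast; ring,
        PySem.List.pyRange_neg_one_cons (by omega), List.foldl_cons]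
    have hj1 : hi + 1 = (j : Int) := by omega
    -- the window
    set cs := line.toList with hcs
    have hwlen : ((cs.drop j).take (cs.length - k - j)).length = cs.length - k - j := by
      simp; omega
    have hwne : (cs.drop j).take (cs.length - k - j) ≠ [] := by
      intro h; have := congrArg List.length h; rw [hwlen] at this; simp at this; omega
    obtain ⟨heq, hu, hv⟩ := pv_pick_spec _ hwne
    generalize hp : pvPick ((cs.drop j).take (cs.length - k - j)) = p at heq hu hv
    obtain ⟨u, c, v⟩ := p
    simp only at heq hu hv
    have hulen : u.length + 1 + v.length = cs.length - k - j := by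
      have := congrArg List.length heq; rw [hwlen] at this; simp at this; omega
    have hwdig : ∀ x ∈ (cs.drop j).take (cs.length - k - j), PySem.Chars.isdigit x = true :=
      fun x hx => hdig x (List.mem_of_mem_drop (List.mem_of_mem_take hx))
    have hcdig : PySem.Chars.isdigit c = true := by
      apply hwdig; rw [heq]; simp
    -- the step
    have hstep : ∀ sub : String,
        sub.toList = (cs.drop j).take (cs.length - k - j) →
        (pvFindHighest sub hi) = (pvVal c, (j : Int) + u.length) := by
      intro sub hsubeq
      rw [pv_fh_spec sub hi (by rw [hsubeq]; exact hwdig) (by rw [hsubeq]; exact hwne)]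
      rw [hsubeq, hp]
      simp only [Prod.mk.injEq]
      refine ⟨trivial, by omega⟩
    -- pick the right slice in each branch
    have harg : (if ((k : Int) > 0)
          then PySem.Str.slice line (some (hi + 1)) (some (-(k : Int)))
          else PySem.Str.slice line (some (hi + 1)) none).toList
        = (cs.drop j).take (cs.length - k - j) := by
      by_cases hk0 : 0 < k
      · rw [if_pos (by exact_mod_cast hk0)]
        simp only [PySem.Str.toList_slice, PySem.Chars.slice_eq_listSlice, hj1]
        exact pv_slice_mixed cs j k hk0
      · have hk00 : k = 0 := by omega
        subst hk00
        rw [if_neg (by omega)]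
        simp only [PySem.Str.toList_slice, PySem.Chars.slice_eq_listSlice, hj1]
        rw [PySem.List.slice_from_natCast]
        rw [List.take_of_length_le (by simp)]
    -- perform the step
    simp only []
    rw [hstep _ harg]
    -- apply the induction hypothesis
    rw [ih line (j + u.length + 1) (s ++ PySem.Int.toStr (pvVal c)) ((j : Int) + u.length)
      (by omega) hdig (by rw [← hcs]; omega)]
    simp only [← hcs]
    -- identify the remaining suffix
    have hdrop : cs.drop (j + u.length + 1) = v ++ (cs.drop j).drop (cs.length - k - j) := by
      have h1 : cs.drop (j + u.length + 1) = (cs.drop j).drop (u.length + 1) := by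
        rw [List.drop_drop]; congr 1
      rw [h1]
      conv_lhs => rw [← List.take_append_drop (cs.length - k - j) (cs.drop j), heq]
      rw [List.drop_append]
      simp
    -- unfold greedy on the right
    have hgre : pvGreedy (cs.drop j) (k+1) = c :: pvGreedy (v ++ (cs.drop j).drop (cs.length - k - j)) k := by
      rw [pvGreedy]
      simp only [List.length_drop]
      rw [show cs.length - j - k = cs.length - k - j from by omega, hp]
    rw [hgre, ← hdrop]
    simp only [String.toList_append, pv_digit_toStr c hcdig, List.append_assoc, List.singleton_append]

theorem pv_A_short : ∀ (k : Nat) (line : String) (j : Nat) (s : String) (hi : Int),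
    hi = (j : Int) - 1 →
    line.toList.length + 1 ≤ j + k →
    (((PySem.List.pyRange ((k : Int) - 1) (-1) (-1)).foldl
      (fun (st : String × Int) num_cycle =>
        let sub_line := if num_cycle > 0
          then PySem.Str.slice line (some (st.2 + 1)) (some (-num_cycle))
          else PySem.Str.slice line (some (st.2 + 1)) none
        let h := pvFindHighest sub_line st.2
        (st.1 ++ PySem.Int.toStr h.1, h.2))
      (s, hi)).1).toList = s.toList ++ List.replicate k '0' := by
  intro k
  induction k with
  | zero =>
    intro line j s hi hhi hlen
    rw [show ((0 : Nat) : Int) - 1 = -1 by norm_num, PySem.List.pyRange_neg_one_eq_nil le_rfl]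
    simp
  | succ k ih =>
    intro line j s hi hhi hlen
    rw [show (((k+1 : Nat)) : Int) - 1 = (k : Int) by push_cast; ring,
        PySem.List.pyRange_neg_one_cons (by omega), List.foldl_cons]
    have hj1 : hi + 1 = (j : Int) := by omega
    have harg : (if ((k : Int) > 0)
          then PySem.Str.slice line (some (hi + 1)) (some (-(k : Int)))
          else PySem.Str.slice line (some (hi + 1)) none).toList = [] := by
      by_cases hk0 : 0 < k
      · rw [if_pos (by exact_mod_cast hk0)]
        simp only [PySem.Str.toList_slice, PySem.Chars.slice_eq_listSlice, hj1]
        rw [pv_slice_mixed line.toList j k hk0]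
        rw [show line.toList.length - k - j = 0 from by omega]
        simp
      · have hk00 : k = 0 := by omega
        subst hk00
        rw [if_neg (by omega)]
        simp only [PySem.Str.toList_slice, PySem.Chars.slice_eq_listSlice, hj1]
        rw [PySem.List.slice_from_natCast]
        rw [List.drop_eq_nil_iff.mpr (by omega)]
    simp only []
    rw [pv_fh_empty _ hi harg]
    simp only [hj1]
    rw [ih line (j+1) (s ++ PySem.Int.toStr 0) ((j : Int)) (by omega) (by omega)]
    simp [String.toList_append, List.replicate_succ,
      show (PySem.Int.toStr 0).toList = ['0'] from by decide]

-- ===== VERDICT (by name: the statement is the Claim_ definition above) =====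
set_option maxHeartbeats 1000000 in
theorem calculate_total_joltage_spec : Claim_equal_calculate_total_joltage := by
  intro input_lines num_cycles hDom hPre
  obtain ⟨hk1', hdig⟩ := hPre
  unfold Spec_calculate_total_joltage calculate_total_joltage calculate_total_joltage_alt
  apply PySem.List.foldl_congr_mem
  intro acc line hmem
  have hk1 : 1 ≤ num_cycles := by
    rcases hk1' with h | h
    · rw [h] at hmem; simp at hmem
    · exact h
  simp only []
  have hofStr : ∀ x : String, PySem.Int.ofStr? x = PySem.Int.ofChars? x.toList := fun _ => rfl
  have hdigLine : num_cycles ≤ (line.toList.length : Int) →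
      ∀ c ∈ line.toList, PySem.Chars.isdigit c = true := by
    intro hle c hc
    have h := hdig line hmem (by rw [PySem.Str.len_eq]; exact hle)
    rw [PySem.Str.strIsdigit_eq, PySem.Chars.strIsdigit] at h
    simp only [Bool.and_eq_true, List.all_eq_true] at h
    exact h.2 c hc
  by_cases hshort : ((line.toList.length : Int) < num_cycles)
  · rw [if_pos hshort]
    have hs := pv_A_short num_cycles.toNat line 0 "" (-1) (by norm_num) (by omega)
    rw [show num_cycles - 1 = ((num_cycles.toNat : Nat) : Int) - 1 from by omega]
    rw [hofStr, hs]
    simp only [String.toList_empty, List.nil_append]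
    rw [show num_cycles.toNat = (num_cycles.toNat - 1) + 1 from by omega, List.replicate_succ]
    rw [pv_zeros_parse]
    simp
  · rw [if_neg hshort]
    have hdig' : ∀ c ∈ line.toList, PySem.Chars.isdigit c = true :=
      hdigLine (by omega)
    have hA := pv_A_loop num_cycles.toNat line 0 "" (-1) (by norm_num) hdig' (by omega)
    rw [List.drop_zero] at hA
    have hB := pv_stack_eq_greedy num_cycles.toNat line.toList (by omega)
    rw [show num_cycles = ((num_cycles.toNat : Nat) : Int) from by omega]
    congr 1
    rw [hofStr, hofStr, hA, hB]
    simp
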